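-- pv_equiv track=rewrite | github.com/JaehoonShin2/coding-test | Programmers/문제풀이/Level_1/Level1_대충 만든 자판.py | solution
-- ===== SOURCE A (Python) =====
-- from collections import defaultdict as dd
--
-- def solution(keymap, targets):
--     answer = []
--
--     d = dd(list)
--
--     for node in keymap:
--         for idx, k in enumerate(node):
--             d[k].append(idx+1)
--
--     for t in targets:
--         result = 0
--         for i in t:
--             if d[i] == []:
--                 result = -1
--                 break
--             else:
--                 result += min(d[i])
--         answer.append(result)
--
--     return answer
-- ===== SOURCE B (Python) =====
-- def solution(keymap, targets):
--     answer = []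
--     for t in targets:
--         result = 0
--         for ch in t:
--             best = None
--             for row in keymap:
--                 if ch in row:
--                     pos = row.index(ch) + 1
--                     if best is None or pos < best:
--                         best = pos
--             if best is None:
--                 result = -1
--                 break
--             result += best
--         answer.append(result)
--     return answer
-- ===== Notes on version B (the rewrite author's own statement) =====
-- stated objective: simpler
-- what changed: B drops A's precomputed char->positions defaultdict entirely: for each target character it scans the keymap rows directly, taking the first-occurrence index per row and keeping the running minimum, with the same -1/break on a missing character.
import Mathlib
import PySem

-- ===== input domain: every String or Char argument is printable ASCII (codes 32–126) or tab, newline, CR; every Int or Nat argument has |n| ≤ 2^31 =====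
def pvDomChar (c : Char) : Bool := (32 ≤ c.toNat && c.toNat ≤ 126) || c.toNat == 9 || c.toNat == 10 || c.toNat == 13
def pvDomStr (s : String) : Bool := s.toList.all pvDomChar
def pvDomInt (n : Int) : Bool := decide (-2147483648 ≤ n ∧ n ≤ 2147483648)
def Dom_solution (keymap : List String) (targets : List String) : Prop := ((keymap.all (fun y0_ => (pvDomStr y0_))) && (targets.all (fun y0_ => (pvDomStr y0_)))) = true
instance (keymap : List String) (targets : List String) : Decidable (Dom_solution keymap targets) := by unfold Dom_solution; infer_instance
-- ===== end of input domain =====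

-- B replaces A's precomputed char→positions dict by a direct per-character scan of the
-- keymap rows keeping the running minimum position (objective: simpler).

-- ===== PORT A =====
-- d[k].append(idx+1) on a defaultdict(list)
def pvBuild (keymap : List String) : PySem.Dict Char (List Int) :=
  keymap.foldl
    (fun d node =>
      (PySem.List.enumerate node.toList 0).foldl
        (fun d p => d.modify p.2 [] (fun l => l ++ [p.1 + 1])) d)
    PySem.Dict.empty

-- the inner 'for i in t' loop with its break
def pvLoopA (d : PySem.Dict Char (List Int)) : List Char → Int → Int
  | [], result => result
  | i :: rest, result =>
    if d.getD i [] = [] then -1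
    else pvLoopA d rest (result + (PySem.List.min? (d.getD i []) (fun x => x)).getD 0)

def solution (keymap : List String) (targets : List String) : List Int :=
  let d := pvBuild keymap
  targets.foldl (fun answer t => answer ++ [pvLoopA d t.toList 0]) []

-- ===== PORT B =====
-- 'if ch in row: pos = row.index(ch) + 1; if best is None or pos < best: best = pos'
def pvBestStep (ch : Char) (best : Option Int) (row : String) : Option Int :=
  match PySem.List.index? row.toList ch with
  | none => best
  | some j =>
    let pos : Int := (j : Int) + 1
    match best with
    | none => some pos
    | some b => if pos < b then some pos else some b

def pvLoopB (keymap : List String) : List Char → Int → Int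
  | [], result => result
  | ch :: rest, result =>
    match keymap.foldl (pvBestStep ch) none with
    | none => -1
    | some best => pvLoopB keymap rest (result + best)

def solution_alt (keymap : List String) (targets : List String) : List Int :=
  targets.foldl (fun answer t => answer ++ [pvLoopB keymap t.toList 0]) []

-- ===== PRECONDITION & SPEC =====
def Spec_solution (keymap : List String) (targets : List String) (out : List Int) : Prop := out = solution_alt keymap targets
instance (keymap : List String) (targets : List String) (out : List Int) : Decidable (Spec_solution keymap targets out) := by unfold Spec_solution; infer_instance

-- ===== CLAIM (what is proved, stated in full; the proofs are below) =====
def Claim_equal_solution : Prop := ∀ (keymap : List String) (targets : List String), Dom_solution keymap targets → Spec_solution keymap targets (solution keymap targets)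

-- ===== LEMMAS AND PROOFS =====

-- positions (index+1, 1-based from offset s) of c in a row
def pvPos (c : Char) (s : Int) : List Char → List Int
  | [] => []
  | x :: xs => (if x = c then [s + 1] else []) ++ pvPos c (s + 1) xs

def pvAllPos (c : Char) (keymap : List String) : List Int :=
  (keymap.map (fun row => pvPos c 0 row.toList)).flatten

theorem pvInner_getD (c : Char) (ps : List (Int × Char)) (d : PySem.Dict Char (List Int)) :
    (ps.foldl (fun d p => d.modify p.2 [] (fun l => l ++ [p.1 + 1])) d).getD c []
      = d.getD c [] ++ ps.filterMap (fun p => if p.2 = c then some (p.1 + 1) else none) := by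
  induction ps generalizing d with
  | nil => simp
  | cons p ps ih =>
    simp only [List.foldl_cons, List.filterMap_cons, ih]
    by_cases h : p.2 = c
    · subst h
      rw [PySem.Dict.getD_modify_self]
      simp
    · rw [PySem.Dict.getD_modify_of_ne]
      · simp [h]
      · exact fun hc => h hc.symm

theorem pvFilterMap_enumerate (c : Char) (cs : List Char) (s : Int) :
    (PySem.List.enumerate cs s).filterMap (fun p => if p.2 = c then some (p.1 + 1) else none)
      = pvPos c s cs := by
  induction cs generalizing s with
  | nil => simp [PySem.List.enumerate_nil, pvPos]
  | cons x xs ih =>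
    rw [PySem.List.enumerate_cons]
    simp only [List.filterMap_cons, pvPos]
    by_cases h : x = c <;> simp [h, ih]

theorem pvBuild_getD (c : Char) (keymap : List String) :
    (pvBuild keymap).getD c [] = pvAllPos c keymap := by
  unfold pvBuild pvAllPos
  suffices h : ∀ (rows : List String) (d : PySem.Dict Char (List Int)),
      (rows.foldl (fun d node =>
          (PySem.List.enumerate node.toList 0).foldl
            (fun d p => d.modify p.2 [] (fun l => l ++ [p.1 + 1])) d) d).getD c []
        = d.getD c [] ++ (rows.map (fun row => pvPos c 0 row.toList)).flatten by
    rw [h]; simp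
  intro rows
  induction rows with
  | nil => simp
  | cons r rs ih =>
    intro d
    simp only [List.foldl_cons, List.map_cons, List.flatten_cons, ih,
      pvInner_getD, pvFilterMap_enumerate, List.append_assoc]

theorem pvPos_lb (c : Char) (s : Int) (cs : List Char) :
    ∀ y ∈ pvPos c s cs, s + 1 ≤ y := by
  induction cs generalizing s with
  | nil => simp [pvPos]
  | cons x xs ih =>
    intro y hy
    simp only [pvPos, List.mem_append] at hy
    rcases hy with hy | hy
    · split at hy <;> simp_all
    · have := ih (s + 1) y hy; omega

theorem pvFoldl_min_of_lb (a : Int) (l : List Int) (h : ∀ y ∈ l, a ≤ y) :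
    l.foldl min a = a := by
  induction l generalizing a with
  | nil => rfl
  | cons x xs ih =>
    simp only [List.foldl_cons]
    have hax : a ≤ x := h x (by simp)
    rw [min_eq_left hax]
    exact ih a (fun y hy => h y (by simp [hy]))

theorem pvFoldl_min_assoc (a b : Int) (l : List Int) :
    l.foldl min (min a b) = min a (l.foldl min b) := by
  induction l generalizing b with
  | nil => rfl
  | cons x xs ih =>
    simp only [List.foldl_cons, min_assoc, ih]

-- min over one row's positions = first index + 1
theorem pvMin_pvPos (c : Char) (cs : List Char) (s : Int) :
    PySem.List.min? (pvPos c s cs) (fun x => x)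
      = (PySem.List.index? cs c).map (fun j : Nat => s + j + 1) := by
  induction cs generalizing s with
  | nil => simp [pvPos]
  | cons x xs ih =>
    by_cases h : x = c
    · subst h
      have hpos : pvPos x s (x :: xs) = (s + 1) :: pvPos x (s + 1) xs := by simp [pvPos]
      rw [hpos, PySem.List.min?_id_cons,
        pvFoldl_min_of_lb (s + 1) _ (fun y hy => by have := pvPos_lb x (s + 1) xs y hy; omega),
        PySem.List.index?_cons_self]
      simp
    · have hne : x ≠ c := h
      have hpos : pvPos c s (x :: xs) = pvPos c (s + 1) xs := by simp [pvPos, h]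
      rw [hpos, ih, PySem.List.index?_cons_of_ne xs hne, Option.map_map]
      cases PySem.List.index? xs c with
      | none => rfl
      | some j =>
        simp only [Option.map_some, Function.comp_apply]
        congr 1
        push_cast
        ring

-- Python's min over a concatenation, first-minimum tie rule
theorem pvMin_append (xs ys : List Int) :
    PySem.List.min? (xs ++ ys) (fun x => x)
      = match PySem.List.min? ys (fun x => x) with
        | none => PySem.List.min? xs (fun x => x)
        | some p =>
          match PySem.List.min? xs (fun x => x) with
          | none => some p
          | some b => if p < b then some p else some b := by
  cases xs with
  | nil =>
    simp only [List.nil_append]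
    cases hys : PySem.List.min? ys (fun x : Int => x) <;> simp [PySem.List.min?]
  | cons x xs =>
    cases ys with
    | nil => simp [PySem.List.min?]
    | cons y ys =>
      simp only [List.cons_append, PySem.List.min?_id_cons]
      rw [List.foldl_append, List.foldl_cons, pvFoldl_min_assoc, min_def]
      split_ifs <;> simp_all <;> omega

-- value-level associativity of the running-minimum combination
theorem pvIf_min_assoc (p q b : Int) :
    (if p < (if q < b then q else b) then (some p : Option Int) else some (if q < b then q else b))
      = if (if p < q then p else q) < b then some (if p < q then p else q) else some b := by
  split_ifs <;> first | rfl | (exfalso; omega)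

-- B's fold over the keymap computes the minimum of all positions
theorem pvBestFold (c : Char) (keymap : List String) :
    keymap.foldl (pvBestStep c) none
      = PySem.List.min? (pvAllPos c keymap) (fun x => x) := by
  unfold pvAllPos
  suffices h : ∀ (rows : List String) (best : Option Int),
      rows.foldl (pvBestStep c) best
        = match PySem.List.min? ((rows.map (fun row => pvPos c 0 row.toList)).flatten) (fun x => x) with
          | none => best
          | some p =>
            match best with
            | none => some p
            | some b => if p < b then some p else some b by
    rw [h]
    cases hm : PySem.List.min? ((keymap.map (fun row => pvPos c 0 row.toList)).flatten) (fun x : Int => x) <;> simp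
  intro rows
  induction rows with
  | nil => intro best; simp [PySem.List.min?]
  | cons r rs ih =>
    intro best
    have hstep : pvBestStep c best r
        = match PySem.List.min? (pvPos c 0 r.toList) (fun x => x) with
          | none => best
          | some q =>
            match best with
            | none => some q
            | some b => if q < b then some q else some b := by
      rw [pvMin_pvPos]
      unfold pvBestStep
      cases PySem.List.index? r.toList c with
      | none => rfl
      | some j => simp
    simp only [List.foldl_cons, List.map_cons, List.flatten_cons, ih, pvMin_append, hstep]
    cases hrest : PySem.List.min? ((rs.map (fun row => pvPos c 0 row.toList)).flatten) (fun x : Int => x) with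
    | none =>
      cases hr : PySem.List.min? (pvPos c 0 r.toList) (fun x : Int => x) <;> cases best <;> rfl
    | some p =>
      cases hr : PySem.List.min? (pvPos c 0 r.toList) (fun x : Int => x) with
      | none => cases best <;> rfl
      | some q =>
        cases best with
        | none => dsimp only; split_ifs <;> rfl
        | some b =>
          dsimp only
          rw [show (if q < b then (some q : Option Int) else some b) = some (if q < b then q else b) from by split_ifs <;> rfl,
            show (if p < q then (some p : Option Int) else some q) = some (if p < q then p else q) from by split_ifs <;> rfl]
          exact pvIf_min_assoc p q b

theorem pvLoop_eq (keymap : List String) (cs : List Char) (res : Int) :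
    pvLoopA (pvBuild keymap) cs res = pvLoopB keymap cs res := by
  induction cs generalizing res with
  | nil => rfl
  | cons c rest ih =>
    simp only [pvLoopA, pvLoopB, pvBuild_getD, pvBestFold]
    cases hm : PySem.List.min? (pvAllPos c keymap) (fun x : Int => x) with
    | none => rw [if_pos ((PySem.List.min?_eq_none_iff _ _).mp hm)]
    | some m =>
      have hne : pvAllPos c keymap ≠ [] := by
        intro h0
        rw [(PySem.List.min?_eq_none_iff _ _).mpr h0] at hm
        simp at hm
      rw [if_neg hne]
      simp [ih]

-- ===== VERDICT (by name: the statement is the Claim_ definition above) =====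
theorem solution_spec : Claim_equal_solution := by
  intro keymap targets _
  unfold Spec_solution solution solution_alt
  simp only [pvLoop_eq]
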